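-- pv_equiv track=rewrite | github.com/younim2837/mlb-totals-paper-track | lineup_features.py | _platoon_advantage_count
-- ===== SOURCE A (Python) =====
-- def _platoon_advantage_count(bat_sides: list[str], opp_pitch_hand: str | None) -> int:
--     if not opp_pitch_hand:
--         return 0
--
--     count = 0
--     for side in bat_sides:
--         if side == "S":
--             count += 1
--         elif opp_pitch_hand == "R" and side == "L":
--             count += 1
--         elif opp_pitch_hand == "L" and side == "R":
--             count += 1
--     return count
-- ===== SOURCE B (Python) =====
-- def _platoon_advantage_count(bat_sides: list[str], opp_pitch_hand: str | None) -> int: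
--     if not opp_pitch_hand:
--         return 0
--     tally = {}
--     for side in bat_sides:
--         tally[side] = tally.get(side, 0) + 1
--     if opp_pitch_hand == "R":
--         return tally.get("S", 0) + tally.get("L", 0)
--     if opp_pitch_hand == "L":
--         return tally.get("S", 0) + tally.get("R", 0)
--     return tally.get("S", 0)
-- ===== Notes on version B (the rewrite author's own statement) =====
-- stated objective: alternative
-- what changed: Replaced the per-element conditional-counting loop with a single Counter tally followed by a closed-form sum of the relevant side counts.
import Mathlib
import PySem

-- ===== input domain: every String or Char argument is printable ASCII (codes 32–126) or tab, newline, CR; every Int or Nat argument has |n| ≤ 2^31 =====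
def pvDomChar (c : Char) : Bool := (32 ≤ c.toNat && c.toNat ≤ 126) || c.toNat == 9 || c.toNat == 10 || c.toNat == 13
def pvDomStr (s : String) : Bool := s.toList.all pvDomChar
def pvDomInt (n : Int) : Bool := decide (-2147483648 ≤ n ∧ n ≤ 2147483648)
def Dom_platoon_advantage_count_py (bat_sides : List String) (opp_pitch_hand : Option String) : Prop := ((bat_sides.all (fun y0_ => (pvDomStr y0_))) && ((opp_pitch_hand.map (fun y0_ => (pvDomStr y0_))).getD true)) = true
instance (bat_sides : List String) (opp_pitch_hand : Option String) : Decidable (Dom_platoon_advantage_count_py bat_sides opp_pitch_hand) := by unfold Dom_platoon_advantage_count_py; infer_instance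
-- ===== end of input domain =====

-- B replaces A's per-element conditional-counting loop with one tally pass (a dict of side counts)
-- and a closed-form sum over the table; objective: alternative decomposition, same O(n) cost.

-- ===== PORT A =====
def platoon_advantage_count_py (bat_sides : List String) (opp_pitch_hand : Option String) : Int :=
  match opp_pitch_hand with
  | none => 0
  | some hand =>
    if hand = "" then 0
    else
      bat_sides.foldl (fun count side =>
        if side = "S" then count + 1
        else if hand = "R" ∧ side = "L" then count + 1
        else if hand = "L" ∧ side = "R" then count + 1
        else count) 0

-- ===== PORT B =====
def platoon_advantage_count_py_alt (bat_sides : List String) (opp_pitch_hand : Option String) : Int :=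
  match opp_pitch_hand with
  | none => 0
  | some hand =>
    if hand = "" then 0
    else
      let tally : PySem.Dict String Int :=
        bat_sides.foldl (fun d x => d.modify x 0 (· + 1)) PySem.Dict.empty
      if hand = "R" then tally.getD "S" 0 + tally.getD "L" 0
      else if hand = "L" then tally.getD "S" 0 + tally.getD "R" 0
      else tally.getD "S" 0

-- ===== PRECONDITION & SPEC =====
def Spec_platoon_advantage_count_py (bat_sides : List String) (opp_pitch_hand : Option String) (out : Int) : Prop := out = platoon_advantage_count_py_alt bat_sides opp_pitch_hand
instance (bat_sides : List String) (opp_pitch_hand : Option String) (out : Int) : Decidable (Spec_platoon_advantage_count_py bat_sides opp_pitch_hand out) := by unfold Spec_platoon_advantage_count_py; infer_instance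

-- ===== CLAIM (what is proved, stated in full; the proofs are below) =====
def Claim_equal_platoon_advantage_count_py : Prop := ∀ (bat_sides : List String) (opp_pitch_hand : Option String), Dom_platoon_advantage_count_py bat_sides opp_pitch_hand → Spec_platoon_advantage_count_py bat_sides opp_pitch_hand (platoon_advantage_count_py bat_sides opp_pitch_hand)

-- ===== LEMMAS AND PROOFS =====
-- A's loop counts, starting from any accumulator, exactly acc + #S + (the hand-matching side's count).
theorem pv_foldA (hand : String) (l : List String) (acc : Int) :
    l.foldl (fun count side =>
        if side = "S" then count + 1
        else if hand = "R" ∧ side = "L" then count + 1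
        else if hand = "L" ∧ side = "R" then count + 1
        else count) acc
      = acc + (l.count "S" : Int)
          + (if hand = "R" then (l.count "L" : Int)
             else if hand = "L" then (l.count "R" : Int) else 0) := by
  induction l generalizing acc with
  | nil => simp
  | cons x xs ih =>
    simp only [List.foldl_cons, List.count_cons, ih]
    by_cases hx : x = "S" <;> by_cases hR : hand = "R" <;> by_cases hL : hand = "L" <;>
      by_cases hxL : x = "L" <;> by_cases hxR : x = "R" <;>
      simp_all <;> omega

-- ===== VERDICT (by name: the statement is the Claim_ definition above) =====
theorem platoon_advantage_count_py_spec : Claim_equal_platoon_advantage_count_py := by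
  intro bat_sides opp_pitch_hand _
  unfold Spec_platoon_advantage_count_py platoon_advantage_count_py platoon_advantage_count_py_alt
  match opp_pitch_hand with
  | none => rfl
  | some hand =>
    simp only
    split_ifs with h0 hR hL <;>
      first
        | rfl
        | (rw [pv_foldA]; simp [PySem.Dict.getD_foldl_modify_add_one, hR, hL])
        | (rw [pv_foldA]; simp [PySem.Dict.getD_foldl_modify_add_one, hR])
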